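-- pv_equiv track=rewrite | github.com/dharm-singh-au26/Dsa-in-python | test/test.py | square_ele
-- ===== SOURCE A (Python) =====
-- def square_ele(list):
--     a = sorted(list)
--     res = []
--     for i in range (0, len(a)):
--         new_list = a[i] * a[i]
--         res.append(new_list)
--     res.sort()
--     s = ' '.join(map(str, res))
--     return s
-- ===== SOURCE B (Python) =====
-- def square_ele(list):
--     return ' '.join(str(x * x) for x in sorted(list, key=abs))
-- ===== Notes on version B (the rewrite author's own statement) =====
-- stated objective: simpler
-- what changed: B performs a single sort keyed by absolute value and squares in order, instead of A's sort-values / square-loop / second sort of the squares; the result string is built in one pass.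
import Mathlib
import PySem

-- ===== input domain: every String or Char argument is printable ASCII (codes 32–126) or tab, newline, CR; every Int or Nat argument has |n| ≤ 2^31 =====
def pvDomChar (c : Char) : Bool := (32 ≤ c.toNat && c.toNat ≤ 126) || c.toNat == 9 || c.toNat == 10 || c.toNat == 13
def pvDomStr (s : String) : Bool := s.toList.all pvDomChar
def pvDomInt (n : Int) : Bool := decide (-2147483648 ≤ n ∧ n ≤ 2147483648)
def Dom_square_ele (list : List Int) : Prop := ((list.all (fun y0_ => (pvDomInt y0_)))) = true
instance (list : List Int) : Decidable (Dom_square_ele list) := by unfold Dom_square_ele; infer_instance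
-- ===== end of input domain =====

-- B replaces A's sort / square-loop / second sort by ONE sort keyed by abs, squaring in order (simpler: one pass, one sort).

-- ===== PORT A =====
def square_ele (list : List Int) : String :=
  let a := PySem.List.sorted list (fun x => x) false
  let res : List Int := (PySem.List.pyRange 0 (a.length : Int) 1).foldl
      (fun res i => res ++ [PySem.List.pyGetD a i 0 * PySem.List.pyGetD a i 0]) []
  let res := PySem.List.sorted res (fun x => x) false
  PySem.Str.join " " (res.map PySem.Int.toStr)

-- ===== PORT B =====
def square_ele_alt (list : List Int) : String :=
  PySem.Str.join " "
    ((PySem.List.sorted list (fun x => |x|) false).map (fun x => PySem.Int.toStr (x * x)))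

-- ===== PRECONDITION & SPEC =====
def Spec_square_ele (list : List Int) (out : String) : Prop := out = square_ele_alt list
instance (list : List Int) (out : String) : Decidable (Spec_square_ele list out) := by unfold Spec_square_ele; infer_instance

-- ===== CLAIM (what is proved, stated in full; the proofs are below) =====
def Claim_equal_square_ele : Prop := ∀ (list : List Int), Dom_square_ele list → Spec_square_ele list (square_ele list)

-- ===== LEMMAS AND PROOFS =====

-- A's index loop over the sorted list builds exactly the list of squares, in order.
theorem pvA_loop_eq_map (a : List Int) :
    (PySem.List.pyRange 0 (a.length : Int) 1).foldl
      (fun res i => res ++ [PySem.List.pyGetD a i 0 * PySem.List.pyGetD a i 0]) []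
      = a.map (fun x => x * x) := by
  have h := PySem.List.foldl_pyRange_zero_pyGetD' a 0
      (fun (res : List Int) (x : Int) => res ++ [x * x]) []
  rw [h]
  simpa using PySem.List.foldl_append_singleton_eq_map (fun x : Int => x * x) a []

-- Sorting the squares of the value-sorted list equals squaring the abs-sorted list.
theorem pvSquares_eq (list : List Int) :
    PySem.List.sorted ((PySem.List.sorted list (fun x => x) false).map (fun x => x * x))
        (fun x => x) false
      = (PySem.List.sorted list (fun x => |x|) false).map (fun x => x * x) := by
  apply PySem.List.eq_of_perm_of_pairwise_le_of_injective (fun x : Int => x)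
      (fun _ _ h => h)
  · exact ((PySem.List.sorted_perm _ _ _).trans
      (((PySem.List.sorted_perm list (fun x => x) false).map _).trans
        (((PySem.List.sorted_perm list (fun x => |x|) false).map _).symm)))
  · exact PySem.List.sorted_pairwise _ _
  · exact (PySem.List.sorted_pairwise list (fun x => |x|)).map _
      (fun {a b} h => by
        simpa [abs_mul_abs_self] using mul_self_le_mul_self (abs_nonneg a) h)

-- ===== VERDICT (by name: the statement is the Claim_ definition above) =====
theorem square_ele_spec : Claim_equal_square_ele := by
  intro list _
  unfold Spec_square_ele square_ele square_ele_alt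
  simp only [pvA_loop_eq_map, pvSquares_eq, List.map_map]
  rfl
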